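-- pv_equiv track=rewrite | github.com/jame2546/Comprog | P2/P2_03_Func2.py | is_heterogram
-- ===== SOURCE A (Python) =====
-- def is_heterogram(s):
--     seen = []
--     for t in s.lower() :
--         if t in "aeiou" :
--             if t in seen :
--                 return False
--             else :
--                 seen.append(t)
--     return True
-- ===== SOURCE B (Python) =====
-- def is_heterogram(s):
--     vowels = [c for c in s.lower() if c in "aeiou"]
--     return len(vowels) == len(set(vowels))
-- ===== Notes on version B (the rewrite author's own statement) =====
-- stated objective: idiomatic
-- what changed: Replaced the incremental seen-list with early return by collecting all vowels in one pass and comparing the vowel count to the distinct-vowel count.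
import Mathlib
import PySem

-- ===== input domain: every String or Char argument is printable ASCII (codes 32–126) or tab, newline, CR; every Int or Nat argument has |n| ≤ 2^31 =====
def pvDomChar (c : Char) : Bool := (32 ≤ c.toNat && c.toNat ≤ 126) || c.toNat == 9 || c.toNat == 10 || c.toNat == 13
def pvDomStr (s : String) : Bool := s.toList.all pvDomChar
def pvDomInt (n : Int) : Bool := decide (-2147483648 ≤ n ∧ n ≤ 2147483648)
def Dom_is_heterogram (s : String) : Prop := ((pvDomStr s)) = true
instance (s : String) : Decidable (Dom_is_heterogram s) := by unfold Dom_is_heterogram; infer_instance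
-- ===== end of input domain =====

-- B collects all vowels in one pass and compares the vowel count with the distinct-vowel count (idiomatic; no incremental 'seen' list, no early return).


-- ===== PORT A =====
-- the loop over s.lower() with the 'seen' accumulator and the early 'return False'
def isHetLoop : List Char → List Char → Bool
  | [], _ => true
  | t :: rest, seen =>
    if "aeiou".toList.contains t then
      if seen.contains t then false
      else isHetLoop rest (seen ++ [t])
    else isHetLoop rest seen

def is_heterogram (s : String) : Bool := isHetLoop (PySem.Str.lower s).toList []

-- ===== PORT B =====
def is_heterogram_alt (s : String) : Bool :=
  let vowels := (PySem.Str.lower s).toList.filter (fun c => "aeiou".toList.contains c)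
  decide (vowels.length = (PySem.Set.ofList vowels).length)

-- ===== PRECONDITION & SPEC =====
def Spec_is_heterogram (s : String) (out : Bool) : Prop := out = is_heterogram_alt s
instance (s : String) (out : Bool) : Decidable (Spec_is_heterogram s out) := by unfold Spec_is_heterogram; infer_instance

-- ===== CLAIM (what is proved, stated in full; the proofs are below) =====
def Claim_equal_is_heterogram : Prop := ∀ (s : String), Dom_is_heterogram s → Spec_is_heterogram s (is_heterogram s)

-- ===== LEMMAS AND PROOFS =====

-- A's loop decides Nodup of (seen ++ remaining vowels)
theorem isHetLoop_eq (l : List Char) : ∀ (seen : List Char), seen.Nodup →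
    isHetLoop l seen = decide ((seen ++ l.filter (fun c => "aeiou".toList.contains c)).Nodup) := by
  induction l with
  | nil => intro seen h; simp [isHetLoop, h]
  | cons t rest ih =>
    intro seen h
    rw [List.filter_cons]
    by_cases hv : ("aeiou".toList.contains t : Bool)
    · rw [if_pos hv]
      by_cases hs : t ∈ seen
      · have hns : ¬ ((seen ++ t :: rest.filter (fun c => "aeiou".toList.contains c)).Nodup) := by
          intro hc
          exact (List.disjoint_of_nodup_append hc) hs (by simp)
        rw [isHetLoop, if_pos hv, if_pos (by simpa using hs)]
        exact (decide_eq_false hns).symm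
      · have h' : (seen ++ [t]).Nodup := by
          simp [List.nodup_append, h]
          intro a ha hat; exact hs (hat ▸ ha)
        rw [isHetLoop, if_pos hv, if_neg (by simpa using hs), ih (seen ++ [t]) h',
          List.append_assoc]
        rfl
    · rw [if_neg hv, isHetLoop, if_neg hv, ih seen h]

-- B's length comparison decides Nodup
theorem len_ofList_iff (xs : List Char) :
    xs.length = (PySem.Set.ofList xs).length ↔ xs.Nodup := by
  induction xs using List.reverseRecOn with
  | nil => simp [PySem.Set.ofList_nil]
  | append_singleton ys x ih =>
    rw [PySem.Set.ofList_append_singleton]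
    have hle := PySem.Set.length_ofList_le (xs := ys)
    by_cases hx : x ∈ ys
    · have hmem : x ∈ PySem.Set.ofList ys := (PySem.Set.mem_ofList ys x).2 hx
      have hadd : PySem.Set.add (PySem.Set.ofList ys) x = PySem.Set.ofList ys := by
        simp [PySem.Set.add, PySem.Set.contains, hmem]
      rw [hadd]
      constructor
      · intro h; exfalso; simp [List.length_append] at h; omega
      · intro h; exfalso
        exact (List.disjoint_of_nodup_append h) hx (by simp)
    · have hmem : x ∉ PySem.Set.ofList ys := fun hc => hx ((PySem.Set.mem_ofList ys x).1 hc)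
      have hadd : PySem.Set.add (PySem.Set.ofList ys) x = PySem.Set.ofList ys ++ [x] := by
        simp [PySem.Set.add, PySem.Set.contains, hmem]
      rw [hadd]
      simp only [List.length_append, List.length_singleton]
      constructor
      · intro h
        have h1 : ys.Nodup := ih.1 (by omega)
        simp [List.nodup_append, h1]
        intro a ha hax; exact hx (hax ▸ ha)
      · intro h
        have h1 : ys.Nodup := (List.nodup_append.mp h).1
        rw [ih.2 h1]

-- ===== VERDICT (by name: the statement is the Claim_ definition above) =====
theorem is_heterogram_spec : Claim_equal_is_heterogram := by
  intro s _
  unfold Spec_is_heterogram is_heterogram is_heterogram_alt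
  rw [isHetLoop_eq _ [] List.nodup_nil]
  simp only [List.nil_append]
  rw [decide_eq_decide]
  exact (len_ofList_iff _).symm
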